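-- pv_equiv track=rewrite | github.com/cclark20/disc-golf-data | src/udisc_live.py | count_scores
-- ===== SOURCE A (Python) =====
-- def count_scores(pars: int, scores: int) -> dict:
--   results = {
--     'aces': 0,
--     'eagles+': 0,
--     'birdies': 0,
--     'pars': 0,
--     'bogeys': 0,
--     'doubles+': 0
--   }
--   for i in range(len(pars)):
--     if scores[i] == 1:
--       results['aces'] += 1
--     elif scores[i] <= pars[i] - 2:
--       results['eagles+'] += 1
--     elif scores[i] == pars[i] - 1:
--       results['birdies'] += 1
--     elif scores[i] == pars[i]:
--       results['pars'] += 1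
--     elif scores[i] == pars[i] + 1:
--       results['bogeys'] += 1
--     elif scores[i] >= pars[i] + 2:
--       results['doubles+'] += 1
--   return results
-- ===== SOURCE B (Python) =====
-- def count_scores(pars: int, scores: int) -> dict:
--   # staged: materialize (is_ace, score-par) per hole, then six independent counts
--   diffs = [(scores[i] == 1, scores[i] - pars[i]) for i in range(len(pars))]
--   rest = [d for ace, d in diffs if not ace]
--   return {
--     'aces': sum(1 for ace, _ in diffs if ace),
--     'eagles+': sum(1 for d in rest if d <= -2),
--     'birdies': rest.count(-1),
--     'pars': rest.count(0),
--     'bogeys': rest.count(1),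
--     'doubles+': sum(1 for d in rest if d >= 2),
--   }
-- ===== Notes on version B (the rewrite author's own statement) =====
-- stated objective: alternative
-- what changed: Replaces the single loop mutating a dict through a five-way elif chain by staged passes: one comprehension materializes (is_ace, score-par) per hole, the non-ace diffs are filtered out once, and the result dict is constructed directly from six independent counts (sum/count) with no mutation.
import Mathlib
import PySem

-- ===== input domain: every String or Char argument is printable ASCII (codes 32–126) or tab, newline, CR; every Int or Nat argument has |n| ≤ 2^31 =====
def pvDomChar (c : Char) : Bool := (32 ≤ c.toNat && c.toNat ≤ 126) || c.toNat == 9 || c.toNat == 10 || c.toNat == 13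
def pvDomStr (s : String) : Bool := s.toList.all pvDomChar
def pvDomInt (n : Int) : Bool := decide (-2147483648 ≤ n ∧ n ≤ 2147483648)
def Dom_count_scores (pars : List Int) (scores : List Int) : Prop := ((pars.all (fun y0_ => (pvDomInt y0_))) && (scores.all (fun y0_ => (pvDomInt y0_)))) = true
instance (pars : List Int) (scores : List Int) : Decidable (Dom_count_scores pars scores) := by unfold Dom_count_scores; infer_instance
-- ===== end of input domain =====

-- B replaces A's single loop mutating a six-key dict through an elif chain by staged passes:
-- materialize (is_ace, score-par) per hole, filter the non-ace diffs once, and build the result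
-- dict directly from six independent counts; objective: alternative. Return-value equivalence.

-- ===== PORT A =====
def count_scores (pars : List Int) (scores : List Int) : List (String × Int) :=
  let results : PySem.Dict String Int := PySem.Dict.ofList
    [("aces", 0), ("eagles+", 0), ("birdies", 0), ("pars", 0), ("bogeys", 0), ("doubles+", 0)]
  let results := (PySem.List.pyRange 0 (pars.length : Int) 1).foldl (fun r i =>
    -- in-range indexing under Pre_; pyGetD's default is never used inside Pre_
    let s := PySem.List.pyGetD scores i 0
    let p := PySem.List.pyGetD pars i 0
    if s = 1 then r.modify "aces" 0 (· + 1)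
    else if s ≤ p - 2 then r.modify "eagles+" 0 (· + 1)
    else if s = p - 1 then r.modify "birdies" 0 (· + 1)
    else if s = p then r.modify "pars" 0 (· + 1)
    else if s = p + 1 then r.modify "bogeys" 0 (· + 1)
    else if s ≥ p + 2 then r.modify "doubles+" 0 (· + 1)
    else r) results
  results.items

-- ===== PORT B =====
def count_scores_alt (pars : List Int) (scores : List Int) : List (String × Int) :=
  let diffs := (PySem.List.pyRange 0 (pars.length : Int) 1).map (fun i =>
    (decide (PySem.List.pyGetD scores i 0 = 1),
     PySem.List.pyGetD scores i 0 - PySem.List.pyGetD pars i 0))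
  let rest := (diffs.filter (fun x => !x.1)).map Prod.snd
  [("aces", ((diffs.filter (fun x => x.1)).length : Int)),
   ("eagles+", ((rest.filter (fun d => d ≤ -2)).length : Int)),
   ("birdies", (PySem.List.count rest (-1) : Int)),
   ("pars", (PySem.List.count rest 0 : Int)),
   ("bogeys", (PySem.List.count rest 1 : Int)),
   ("doubles+", ((rest.filter (fun d => d ≥ 2)).length : Int))]

-- ===== PRECONDITION & SPEC =====
-- A (and B) raise IndexError when scores is shorter than pars; exactly those inputs are excluded.
def Pre_count_scores (pars : List Int) (scores : List Int) : Prop :=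
  pars.length ≤ scores.length
instance (pars : List Int) (scores : List Int) : Decidable (Pre_count_scores pars scores) := by
  unfold Pre_count_scores; infer_instance
def pvWitness_count_scores : List Int × List Int := ([3, 4, 3], [1, 4, 5])

def Spec_count_scores (pars : List Int) (scores : List Int) (out : List (String × Int)) : Prop := out = count_scores_alt pars scores
instance (pars : List Int) (scores : List Int) (out : List (String × Int)) : Decidable (Spec_count_scores pars scores out) := by unfold Spec_count_scores; infer_instance

-- ===== CLAIM (what is proved, stated in full; the proofs are below) =====
def Claim_equal_count_scores : Prop := ∀ (pars : List Int) (scores : List Int), Dom_count_scores pars scores → Pre_count_scores pars scores → Spec_count_scores pars scores (count_scores pars scores)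

-- ===== LEMMAS AND PROOFS =====

-- A's loop body, abstracted over the index list.
def csStep (pars scores : List Int) (r : PySem.Dict String Int) (i : Int) : PySem.Dict String Int :=
  let s := PySem.List.pyGetD scores i 0
  let p := PySem.List.pyGetD pars i 0
  if s = 1 then r.modify "aces" 0 (· + 1)
  else if s ≤ p - 2 then r.modify "eagles+" 0 (· + 1)
  else if s = p - 1 then r.modify "birdies" 0 (· + 1)
  else if s = p then r.modify "pars" 0 (· + 1)
  else if s = p + 1 then r.modify "bogeys" 0 (· + 1)
  else if s ≥ p + 2 then r.modify "doubles+" 0 (· + 1)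
  else r

-- B's per-index pair.
def csPair (pars scores : List Int) (i : Int) : Bool × Int :=
  (decide (PySem.List.pyGetD scores i 0 = 1),
   PySem.List.pyGetD scores i 0 - PySem.List.pyGetD pars i 0)

-- Main invariant: folding A's step over any index list, from a six-key dict with
-- arbitrary values, accumulates exactly B's six staged counts.
theorem cs_foldl_items (pars scores : List Int) (L : List Int) :
    ∀ (a e b p bo d : Int),
    (L.foldl (csStep pars scores) (PySem.Dict.ofList
      [("aces", a), ("eagles+", e), ("birdies", b), ("pars", p), ("bogeys", bo), ("doubles+", d)])).items
    = (let diffs := L.map (csPair pars scores)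
       let rest := (diffs.filter (fun x => !x.1)).map Prod.snd
       [("aces", a + ((diffs.filter (fun x => x.1)).length : Int)),
        ("eagles+", e + ((rest.filter (fun x => x ≤ -2)).length : Int)),
        ("birdies", b + (PySem.List.count rest (-1) : Int)),
        ("pars", p + (PySem.List.count rest 0 : Int)),
        ("bogeys", bo + (PySem.List.count rest 1 : Int)),
        ("doubles+", d + ((rest.filter (fun x => x ≥ 2)).length : Int))]) := by
  induction L with
  | nil => intro a e b p bo d; simp [PySem.Dict.ofList]; rfl
  | cons i L ih =>
    intro a e b p bo d
    rw [List.foldl_cons]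
    set s := PySem.List.pyGetD scores i 0 with hs
    set q := PySem.List.pyGetD pars i 0 with hq
    by_cases h1 : s = 1
    · have hstep : csStep pars scores (PySem.Dict.ofList
        [("aces", a), ("eagles+", e), ("birdies", b), ("pars", p), ("bogeys", bo), ("doubles+", d)]) i
        = PySem.Dict.ofList [("aces", a + 1), ("eagles+", e), ("birdies", b), ("pars", p), ("bogeys", bo), ("doubles+", d)] := by
        simp only [csStep, ← hs, ← hq]; rw [if_pos h1]; rfl
      rw [hstep, ih]
      simp [csPair, ← hs, h1]
      omega
    · by_cases h2 : s ≤ q - 2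
      · have hstep : csStep pars scores (PySem.Dict.ofList
          [("aces", a), ("eagles+", e), ("birdies", b), ("pars", p), ("bogeys", bo), ("doubles+", d)]) i
          = PySem.Dict.ofList [("aces", a), ("eagles+", e + 1), ("birdies", b), ("pars", p), ("bogeys", bo), ("doubles+", d)] := by
          simp only [csStep, ← hs, ← hq]; rw [if_neg h1, if_pos h2]; rfl
        rw [hstep, ih]
        have hd1 : ¬ (s - q = -1) := by omega
        have hd0 : ¬ (s - q = 0) := by omega
        have hdp1 : ¬ (s - q = 1) := by omega
        have hd2 : s - q ≤ -2 := by omega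
        have hdg : ¬ (s - q ≥ 2) := by omega
        simp [csPair, ← hs, ← hq, h1, PySem.List.count,
              hd1, hd0, hdp1, hd2, hdg]
        omega
      · by_cases h3 : s = q - 1
        · have hstep : csStep pars scores (PySem.Dict.ofList
            [("aces", a), ("eagles+", e), ("birdies", b), ("pars", p), ("bogeys", bo), ("doubles+", d)]) i
            = PySem.Dict.ofList [("aces", a), ("eagles+", e), ("birdies", b + 1), ("pars", p), ("bogeys", bo), ("doubles+", d)] := by
            simp only [csStep, ← hs, ← hq]; rw [if_neg h1, if_neg h2, if_pos h3]; rfl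
          rw [hstep, ih]
          have hd1 : s - q = -1 := by omega
          have hd0 : ¬ (s - q = 0) := by omega
          have hdp1 : ¬ (s - q = 1) := by omega
          have hd2 : ¬ (s - q ≤ -2) := by omega
          have hdg : ¬ (s - q ≥ 2) := by omega
          simp [csPair, ← hs, ← hq, h1, PySem.List.count, hd1]
          omega
        · by_cases h4 : s = q
          · have hstep : csStep pars scores (PySem.Dict.ofList
              [("aces", a), ("eagles+", e), ("birdies", b), ("pars", p), ("bogeys", bo), ("doubles+", d)]) i
              = PySem.Dict.ofList [("aces", a), ("eagles+", e), ("birdies", b), ("pars", p + 1), ("bogeys", bo), ("doubles+", d)] := by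
              simp only [csStep, ← hs, ← hq]; rw [if_neg h1, if_neg h2, if_neg h3, if_pos h4]; rfl
            rw [hstep, ih]
            have hd1 : ¬ (s - q = -1) := by omega
            have hd0 : s - q = 0 := by omega
            have hdp1 : ¬ (s - q = 1) := by omega
            have hd2 : ¬ (s - q ≤ -2) := by omega
            have hdg : ¬ (s - q ≥ 2) := by omega
            simp [csPair, ← hs, ← hq, h1, PySem.List.count, hd0]
            omega
          · by_cases h5 : s = q + 1
            · have hstep : csStep pars scores (PySem.Dict.ofList
                [("aces", a), ("eagles+", e), ("birdies", b), ("pars", p), ("bogeys", bo), ("doubles+", d)]) i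
                = PySem.Dict.ofList [("aces", a), ("eagles+", e), ("birdies", b), ("pars", p), ("bogeys", bo + 1), ("doubles+", d)] := by
                simp only [csStep, ← hs, ← hq]; rw [if_neg h1, if_neg h2, if_neg h3, if_neg h4, if_pos h5]; rfl
              rw [hstep, ih]
              have hd1 : ¬ (s - q = -1) := by omega
              have hd0 : ¬ (s - q = 0) := by omega
              have hdp1 : s - q = 1 := by omega
              have hd2 : ¬ (s - q ≤ -2) := by omega
              have hdg : ¬ (s - q ≥ 2) := by omega
              simp [csPair, ← hs, ← hq, h1, PySem.List.count, hdp1]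
              omega
            · have h6 : s ≥ q + 2 := by omega
              have hstep : csStep pars scores (PySem.Dict.ofList
                [("aces", a), ("eagles+", e), ("birdies", b), ("pars", p), ("bogeys", bo), ("doubles+", d)]) i
                = PySem.Dict.ofList [("aces", a), ("eagles+", e), ("birdies", b), ("pars", p), ("bogeys", bo), ("doubles+", d + 1)] := by
                simp only [csStep, ← hs, ← hq]; rw [if_neg h1, if_neg h2, if_neg h3, if_neg h4, if_neg h5, if_pos h6]; rfl
              rw [hstep, ih]
              have hd1 : ¬ (s - q = -1) := by omega
              have hd0 : ¬ (s - q = 0) := by omega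
              have hdp1 : ¬ (s - q = 1) := by omega
              have hd2 : ¬ (s - q ≤ -2) := by omega
              have hdg : s - q ≥ 2 := by omega
              simp [csPair, ← hs, ← hq, h1, PySem.List.count,
                    hd1, hd0, hdp1, hd2, hdg]
              omega

-- ===== VERDICT (by name: the statement is the Claim_ definition above) =====
theorem count_scores_spec : Claim_equal_count_scores := by
  intro pars scores _ _
  unfold Spec_count_scores count_scores count_scores_alt
  have h := cs_foldl_items pars scores (PySem.List.pyRange 0 (pars.length : Int) 1) 0 0 0 0 0 0
  simp only [show (fun (r : PySem.Dict String Int) (i : Int) =>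
      let s := PySem.List.pyGetD scores i 0
      let p := PySem.List.pyGetD pars i 0
      if s = 1 then r.modify "aces" 0 (· + 1)
      else if s ≤ p - 2 then r.modify "eagles+" 0 (· + 1)
      else if s = p - 1 then r.modify "birdies" 0 (· + 1)
      else if s = p then r.modify "pars" 0 (· + 1)
      else if s = p + 1 then r.modify "bogeys" 0 (· + 1)
      else if s ≥ p + 2 then r.modify "doubles+" 0 (· + 1)
      else r) = csStep pars scores from rfl]
  rw [h]
  simp only [show csPair pars scores = (fun i =>
      (decide (PySem.List.pyGetD scores i 0 = 1),
       PySem.List.pyGetD scores i 0 - PySem.List.pyGetD pars i 0)) from rfl]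
  norm_num
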